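-- pv_equiv track=rewrite | github.com/diezguerra/codingbat-python-solutions | list-2.py | sum67
-- ===== SOURCE A (Python) =====
-- def sum67(nums):
--   """
--   Return the sum of the numbers in the array, except ignore sections of numbers
--   starting with a 6 and extending to the next 7 (every 6 will be followed by at
--   least one 7). Return 0 for no numbers.
--   """
--   count = 0
--   blocked = False
--
--   for n in nums:
--     if n == 6:
--       blocked = True
--       continue
--     if n == 7 and blocked:
--       blocked = False
--       continue
--     if not blocked:
--       count += n
--
--   return count
-- ===== SOURCE B (Python) =====
-- def sum67(nums):
--     total = 0
--     i = 0
--     n = len(nums)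
--     while i < n:
--         if nums[i] == 6:
--             while i < n and nums[i] != 7:
--                 i += 1
--             i += 1
--         else:
--             total += nums[i]
--             i += 1
--     return total
-- ===== Notes on version B (the rewrite author's own statement) =====
-- stated objective: alternative
-- what changed: Replaces the carried 'blocked' flag with an explicit index walk that, upon seeing a 6, runs an inner skip-scan consuming the whole 6..7 section at once.
import Mathlib
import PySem

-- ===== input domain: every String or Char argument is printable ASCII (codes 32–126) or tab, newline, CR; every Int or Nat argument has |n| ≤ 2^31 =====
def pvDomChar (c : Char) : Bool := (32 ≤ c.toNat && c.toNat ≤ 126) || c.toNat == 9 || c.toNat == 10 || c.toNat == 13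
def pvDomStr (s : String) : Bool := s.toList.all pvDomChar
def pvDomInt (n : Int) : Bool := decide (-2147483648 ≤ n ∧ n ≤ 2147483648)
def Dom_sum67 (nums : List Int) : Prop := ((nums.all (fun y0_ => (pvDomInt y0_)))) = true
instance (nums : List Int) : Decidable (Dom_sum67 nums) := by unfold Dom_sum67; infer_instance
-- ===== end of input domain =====

-- B replaces A's carried 'blocked' flag with an index walk whose inner skip-scan
-- consumes each 6..7 section at once (objective: alternative decomposition).


-- ===== PORT A =====
-- for n in nums: flag-carrying fold over (count, blocked)
def sum67 (nums : List Int) : Int :=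
  (nums.foldl
    (fun (s : Int × Bool) n =>
      if n == 6 then (s.1, true)
      else if n == 7 && s.2 then (s.1, false)
      else if !s.2 then (s.1 + n, s.2)
      else s)
    (0, false)).1

-- ===== PORT B =====
-- inner `while i < n and nums[i] != 7: i += 1` followed by `i += 1`:
-- on the suffix view, drop up to and including the first 7
def skip7 : List Int → List Int
  | [] => []
  | x :: xs => if x == 7 then xs else skip7 xs

theorem skip7_length_le (l : List Int) : (skip7 l).length ≤ l.length := by
  induction l with
  | nil => simp [skip7]
  | cons x xs ih =>
    simp only [skip7]
    split
    · simp
    · exact Nat.le_succ_of_le ih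

-- outer while loop: the suffix nums[i:] is the list argument, total the accumulator
def sum67Go : List Int → Int → Int
  | [], total => total
  | x :: xs, total =>
      if x == 6 then sum67Go (skip7 xs) total
      else sum67Go xs (total + x)
  termination_by l _ => l.length
  decreasing_by
  · exact Nat.lt_succ_of_le (skip7_length_le xs)
  · simp

def sum67_alt (nums : List Int) : Int := sum67Go nums 0

-- ===== PRECONDITION & SPEC =====
def Spec_sum67 (nums : List Int) (out : Int) : Prop := out = sum67_alt nums
instance (nums : List Int) (out : Int) : Decidable (Spec_sum67 nums out) := by unfold Spec_sum67; infer_instance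

-- ===== CLAIM (what is proved, stated in full; the proofs are below) =====
def Claim_equal_sum67 : Prop := ∀ (nums : List Int), Dom_sum67 nums → Spec_sum67 nums (sum67 nums)

-- ===== LEMMAS AND PROOFS =====

-- A's step function, named for the lemmas
def aStep (s : Int × Bool) (n : Int) : Int × Bool :=
  if n == 6 then (s.1, true)
  else if n == 7 && s.2 then (s.1, false)
  else if !s.2 then (s.1 + n, s.2)
  else s

-- Joint invariant: from an unblocked state A's fold computes sum67Go on the suffix;
-- from a blocked state it computes sum67Go on the suffix past the next 7.
theorem fold_eq_go (l : List Int) :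
    (∀ c : Int, (l.foldl aStep (c, false)).1 = sum67Go l c) ∧
    (∀ c : Int, (l.foldl aStep (c, true)).1 = sum67Go (skip7 l) c) := by
  induction l with
  | nil => constructor <;> intro c <;> simp [sum67Go, skip7]
  | cons x xs ih =>
    refine ⟨fun c => ?_, fun c => ?_⟩
    · by_cases h6 : x = 6
      · subst h6
        have h : aStep (c, false) 6 = (c, true) := by simp [aStep]
        rw [List.foldl_cons, h, sum67Go]
        simpa using ih.2 c
      · have h : aStep (c, false) x = (c + x, false) := by simp [aStep, h6]
        rw [List.foldl_cons, h, sum67Go, if_neg (by simpa using h6)]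
        exact ih.1 (c + x)
    · by_cases h7 : x = 7
      · subst h7
        have h : aStep (c, true) 7 = (c, false) := by simp [aStep]
        rw [List.foldl_cons, h, skip7]
        simpa using ih.1 c
      · have h : aStep (c, true) x = (c, true) := by
          by_cases h6 : x = 6 <;> simp [aStep, h6, h7]
        rw [List.foldl_cons, h, skip7, if_neg (by simpa using h7)]
        exact ih.2 c

-- ===== VERDICT (by name: the statement is the Claim_ definition above) =====
theorem sum67_spec : Claim_equal_sum67 := by
  intro nums _
  show sum67 nums = sum67_alt nums
  have h : sum67 nums = (nums.foldl aStep (0, false)).1 := rfl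
  rw [h, (fold_eq_go nums).1 0]
  rfl
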